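-- pv_equiv track=rewrite | github.com/evgser/FloorPlanProjects | 1.2/preprocessingModule.py | transform_to_room
-- ===== SOURCE A (Python) =====
-- def transform_to_room(connectivity_graph_list):
--     """ """
--     #Инициализируем переменные
--     location_list = []
--
--     #Удаляем все графы меньше 4
--     i = 0
--     while i < len(connectivity_graph_list):
--         if len(connectivity_graph_list[i]) < 4:
--             del connectivity_graph_list[i]
--         else:
--             i = i + 1
--
--
--     for i in range(len(connectivity_graph_list)):
--
--         #Заполняем списки y и x для каждого объекта
--         list_y = [connectivity_graph_list[i][j][1] for j in range(len(connectivity_graph_list[i]))]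
--         list_x = [connectivity_graph_list[i][j][0] for j in range(len(connectivity_graph_list[i]))]
--
--         #Ищем min_y
--         min_y = min(list_y)
--         #Инициализируем список для поиска min_x и max_x
--         list_mmx = []
--
--         while min_y in list_y:
--
--             #Заполняем список х при min_y
--             list_mmx.append(list_x[list_y.index(min_y)])
--             #Удаляем ячейку для поиска следующего элемента
--             del list_x[list_y.index(min_y)]
--             list_y.remove(min_y)
--
--
--         #Ищем min_x и max_x при min_y
--         min_x1 = min(list_mmx)
--         max_x1 = max(list_mmx)
--
--         #Ищем max_y
--         max_y = max(list_y)
--         #Инициализируем список для поиска min_x и max_x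
--         list_mmx = []
--
--         while max_y in list_y:
--
--             #Заполняем список х при max_y
--             list_mmx.append(list_x[list_y.index(max_y)])
--             #Удаляем ячейку для поиска следующего элемента
--             del list_x[list_y.index(max_y)]
--             list_y.remove(max_y)
--
--
--         #Ищем min_x и max_x при min_y
--         min_x2 = min(list_mmx)
--         max_x2 = max(list_mmx)
--
--         if min_x1 == min_x2 and max_x1 == max_x2:
--             location_list.append([(min_x1, min_y), (max_x1, min_y), (max_x2, max_y), (min_x2, max_y)])
--
--
--     return location_list
-- ===== SOURCE B (Python) =====
-- def transform_to_room(connectivity_graph_list):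
--     """ """
--     # Prune graphs with fewer than 4 vertices in place (A does the same via del).
--     connectivity_graph_list[:] = [g for g in connectivity_graph_list if len(g) >= 4]
--     location_list = []
--     for g in connectivity_graph_list:
--         ys = [y for _, y in g]
--         min_y = min(ys)
--         max_y = max(ys)
--         xs_min = [x for x, y in g if y == min_y]
--         xs_max = [x for x, y in g if y == max_y]
--         lo1, hi1 = min(xs_min), max(xs_min)
--         lo2, hi2 = min(xs_max), max(xs_max)
--         if lo1 == lo2 and hi1 == hi2:
--             location_list.append([(lo1, min_y), (hi1, min_y), (hi2, max_y), (lo2, max_y)])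
--     return location_list
-- ===== Notes on version B (the rewrite author's own statement) =====
-- stated objective: faster
-- what changed: B replaces A's quadratic while-loops (repeated `in`/`index`/`remove`/`del` scans that destructively peel off extreme-y points) by constant-many linear comprehension passes per graph: min/max of the y-list and one filter each for the x's at the minimal and maximal y.
import Mathlib
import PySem

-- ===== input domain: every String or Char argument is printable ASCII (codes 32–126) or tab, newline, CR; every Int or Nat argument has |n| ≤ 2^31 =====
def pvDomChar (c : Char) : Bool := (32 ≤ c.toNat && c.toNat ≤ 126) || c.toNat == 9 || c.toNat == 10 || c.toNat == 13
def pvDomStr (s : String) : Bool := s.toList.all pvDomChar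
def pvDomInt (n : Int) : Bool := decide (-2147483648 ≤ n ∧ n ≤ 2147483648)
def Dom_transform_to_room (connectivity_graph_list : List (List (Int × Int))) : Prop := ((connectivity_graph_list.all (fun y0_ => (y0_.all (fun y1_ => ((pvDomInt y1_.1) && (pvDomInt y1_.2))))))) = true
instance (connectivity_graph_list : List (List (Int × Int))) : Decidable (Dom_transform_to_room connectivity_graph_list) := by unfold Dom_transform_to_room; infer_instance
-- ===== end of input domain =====

-- B replaces A's quadratic destructive while-loops by constant-many linear passes per graph
-- (min/max of the y's plus one filter for the x's at each extreme y); return-value equivalence —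
-- both Pythons prune graphs of fewer than 4 vertices from the argument list in place, identically.

-- ===== PORT A =====
-- A's first while loop: walks index i, deleting graphs shorter than 4 in place.
def pruneLoop (i : Nat) (l : List (List (Int × Int))) : List (List (Int × Int)) :=
  if h : i < l.length then
    if l[i].length < 4 then pruneLoop i (l.eraseIdx i)
    else pruneLoop (i + 1) l
  else l
termination_by l.length - i
decreasing_by
  · rw [List.length_eraseIdx]; split <;> omega
  · omega

-- A's inner 'while min_y in list_y' loop (one copy per extreme); the fuel is the initial
-- length of list_y, an upper bound on the iterations since each one removes an element.
def mmxLoop : Nat → Int → List Int → List Int → List Int → List Int × List Int × List Int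
  | 0, _, lx, ly, acc => (acc, lx, ly)
  | fuel + 1, t, lx, ly, acc =>
    if t ∈ ly then
      match PySem.List.index? ly t, PySem.List.remove? ly t with
      | some idx, some ly' =>
          mmxLoop fuel t (lx.eraseIdx idx) ly' (acc ++ [PySem.List.pyGetD lx (idx : Int) 0])
      | _, _ => (acc, lx, ly)
    else (acc, lx, ly)

-- A's for-loop body for one graph g (getD defaults are unreachable under Pre_).
def aStep (location_list : List (List (Int × Int))) (g : List (Int × Int)) : List (List (Int × Int)) :=
  let list_y := (PySem.List.pyRange 0 (PySem.List.len g)).map (fun j => (PySem.List.pyGetD g j ((0 : Int), (0 : Int))).2)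
  let list_x := (PySem.List.pyRange 0 (PySem.List.len g)).map (fun j => (PySem.List.pyGetD g j ((0 : Int), (0 : Int))).1)
  let min_y := (PySem.List.min? list_y (fun y => y)).getD 0
  let r1 := mmxLoop list_y.length min_y list_x list_y []
  let min_x1 := (PySem.List.min? r1.1 (fun x => x)).getD 0
  let max_x1 := (PySem.List.max? r1.1 (fun x => x)).getD 0
  let max_y := (PySem.List.max? r1.2.2 (fun y => y)).getD 0
  let r2 := mmxLoop r1.2.2.length max_y r1.2.1 r1.2.2 []
  let min_x2 := (PySem.List.min? r2.1 (fun x => x)).getD 0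
  let max_x2 := (PySem.List.max? r2.1 (fun x => x)).getD 0
  if min_x1 = min_x2 ∧ max_x1 = max_x2 then
    location_list ++ [[(min_x1, min_y), (max_x1, min_y), (max_x2, max_y), (min_x2, max_y)]]
  else location_list

def transform_to_room (connectivity_graph_list : List (List (Int × Int))) : List (List (Int × Int)) :=
  let pruned := pruneLoop 0 connectivity_graph_list
  (PySem.List.pyRange 0 (PySem.List.len pruned)).foldl
    (fun location_list i => aStep location_list (PySem.List.pyGetD pruned i [])) []

-- ===== PORT B =====
def bStep (location_list : List (List (Int × Int))) (g : List (Int × Int)) : List (List (Int × Int)) :=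
  let ys := g.map (fun p => p.2)
  let min_y := (PySem.List.min? ys (fun y => y)).getD 0
  let max_y := (PySem.List.max? ys (fun y => y)).getD 0
  let xs_min := (g.filter (fun p => p.2 == min_y)).map (fun p => p.1)
  let xs_max := (g.filter (fun p => p.2 == max_y)).map (fun p => p.1)
  let lo1 := (PySem.List.min? xs_min (fun x => x)).getD 0
  let hi1 := (PySem.List.max? xs_min (fun x => x)).getD 0
  let lo2 := (PySem.List.min? xs_max (fun x => x)).getD 0
  let hi2 := (PySem.List.max? xs_max (fun x => x)).getD 0
  if lo1 = lo2 ∧ hi1 = hi2 then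
    location_list ++ [[(lo1, min_y), (hi1, min_y), (hi2, max_y), (lo2, max_y)]]
  else location_list

def transform_to_room_alt (connectivity_graph_list : List (List (Int × Int))) : List (List (Int × Int)) :=
  (connectivity_graph_list.filter (fun g => decide (4 ≤ g.length))).foldl bStep []

-- ===== PRECONDITION & SPEC =====
-- Pre_ excludes exactly the inputs on which A raises ValueError: a kept graph (≥ 4 vertices)
-- whose y-coordinates are all equal makes A's second max() see an empty list.
def Pre_transform_to_room (connectivity_graph_list : List (List (Int × Int))) : Prop :=
  ∀ g ∈ connectivity_graph_list, 4 ≤ g.length → ∃ p ∈ g, ∃ q ∈ g, p.2 ≠ q.2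
instance (connectivity_graph_list : List (List (Int × Int))) : Decidable (Pre_transform_to_room connectivity_graph_list) := by unfold Pre_transform_to_room; infer_instance

def pvWitness_transform_to_room : (List (List (Int × Int))) := [[(0, 0), (1, 0), (1, 1), (0, 1)]]

def Spec_transform_to_room (connectivity_graph_list : List (List (Int × Int))) (out : List (List (Int × Int))) : Prop := out = transform_to_room_alt connectivity_graph_list
instance (connectivity_graph_list : List (List (Int × Int))) (out : List (List (Int × Int))) : Decidable (Spec_transform_to_room connectivity_graph_list out) := by unfold Spec_transform_to_room; infer_instance

-- ===== CLAIM (what is proved, stated in full; the proofs are below) =====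
def Claim_equal_transform_to_room : Prop := ∀ (connectivity_graph_list : List (List (Int × Int))), Dom_transform_to_room connectivity_graph_list → Pre_transform_to_room connectivity_graph_list → Spec_transform_to_room connectivity_graph_list (transform_to_room connectivity_graph_list)

-- ===== LEMMAS AND PROOFS =====

lemma prune_spec : ∀ (n : Nat) (l : List (List (Int × Int))) (i : Nat), l.length - i ≤ n →
    pruneLoop i l = l.take i ++ (l.drop i).filter (fun g => decide (4 ≤ g.length)) := by
  intro n
  induction n with
  | zero =>
    intro l i h
    have hle : l.length ≤ i := by omega
    rw [pruneLoop]
    simp [Nat.not_lt.mpr hle, List.take_of_length_le hle, List.drop_of_length_le hle]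
  | succ n ih =>
    intro l i h
    rw [pruneLoop]
    by_cases hi : i < l.length
    · simp only [hi, dif_pos]
      have hdrop : l.drop i = l[i] :: l.drop (i + 1) := List.drop_eq_getElem_cons hi
      by_cases hlen : l[i].length < 4
      · simp only [hlen, if_pos]
        rw [ih (l.eraseIdx i) i (by rw [List.length_eraseIdx]; split <;> omega)]
        rw [List.eraseIdx_eq_take_drop_succ]
        rw [List.take_append_of_le_length (by simp [List.length_take]; omega)]
        rw [List.take_take]
        simp only [Nat.min_self]
        rw [List.drop_append_of_le_length (by simp [List.length_take]; omega)]
        rw [hdrop]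
        simp only [List.drop_take, Nat.sub_self, List.take_zero, List.nil_append]
        rw [List.filter_cons]
        simp only [decide_eq_true_eq, if_neg (by omega : ¬ 4 ≤ l[i].length)]
      · simp only [hlen]
        rw [ih l (i + 1) (by omega)]
        rw [hdrop, List.filter_cons]
        simp only [decide_eq_true_eq.mpr (by omega : 4 ≤ l[i].length), if_true]
        have ht : List.take (i + 1) l = List.take i l ++ [l[i]] := by
          rw [List.take_add_one, List.getElem?_eq_getElem hi]; rfl
        rw [ht, List.append_assoc, List.singleton_append]
        simp
    · simp [hi, List.take_of_length_le (Nat.not_lt.mp hi), List.drop_of_length_le (Nat.not_lt.mp hi)]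

lemma exists_first_snd (t : Int) : ∀ (ps : List (Int × Int)), t ∈ ps.map (fun p => p.2) →
    ∃ a p b, ps = a ++ p :: b ∧ p.2 = t ∧ ∀ q ∈ a, q.2 ≠ t := by
  intro ps
  induction ps with
  | nil => simp
  | cons x xs ih =>
    intro h
    by_cases hx : x.2 = t
    · exact ⟨[], x, xs, rfl, hx, by simp⟩
    · have hm : t ∈ xs.map (fun p => p.2) := by
        simp only [List.map_cons, List.mem_cons] at h
        rcases h with h | h
        · exact absurd h.symm hx
        · exact h
      obtain ⟨a, p, b, rfl, hp, ha⟩ := ih hm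
      exact ⟨x :: a, p, b, rfl, hp, by
        intro q hq; rcases List.mem_cons.mp hq with rfl | hq
        · exact hx
        · exact ha q hq⟩

lemma mmx_spec (t : Int) : ∀ (fuel : Nat) (ps : List (Int × Int)) (acc : List Int), ps.length ≤ fuel →
    mmxLoop fuel t (ps.map (fun p => p.1)) (ps.map (fun p => p.2)) acc =
      (acc ++ (ps.filter (fun p => p.2 == t)).map (fun p => p.1),
       (ps.filter (fun p => p.2 != t)).map (fun p => p.1),
       (ps.filter (fun p => p.2 != t)).map (fun p => p.2)) := by
  intro fuel
  induction fuel with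
  | zero =>
    intro ps acc h
    have hnil : ps = [] := List.length_eq_zero_iff.mp (by omega)
    subst hnil
    simp [mmxLoop]
  | succ fuel ih =>
    intro ps acc h
    by_cases hmem : t ∈ ps.map (fun p => p.2)
    · obtain ⟨a, p, b, rfl, hp, ha⟩ := exists_first_snd t ps hmem
      have hnta : t ∉ a.map (fun q => q.2) := by
        simp only [List.mem_map]; rintro ⟨q, hq, hq2⟩; exact ha q hq hq2
      have hsnd : (a ++ p :: b).map (fun p => p.2) = a.map (fun q => q.2) ++ t :: b.map (fun q => q.2) := by
        simp [hp]
      have hidx : PySem.List.index? ((a ++ p :: b).map (fun p => p.2)) t = some a.length := by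
        rw [hsnd, PySem.List.index?_eq_some_iff]
        exact ⟨a.map (fun q => q.2), b.map (fun q => q.2), rfl, by simp, hnta⟩
      have hrem : PySem.List.remove? ((a ++ p :: b).map (fun p => p.2)) t
          = some (a.map (fun q => q.2) ++ b.map (fun q => q.2)) := by
        rw [PySem.List.remove?_eq_some_erase _ t hmem, hsnd]
        rw [List.erase_append_right _ hnta, List.erase_cons_head]
      have hfst : (a ++ p :: b).map (fun p => p.1) = a.map (fun q => q.1) ++ p.1 :: b.map (fun q => q.1) := by
        simp
      have hget : PySem.List.pyGetD ((a ++ p :: b).map (fun p => p.1)) ((a.length : Nat) : Int) 0 = p.1 := by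
        rw [hfst]
        rw [PySem.List.pyGetD_eq_getElem _ _ (by positivity) (by simp)]
        simp
      have herase : ((a ++ p :: b).map (fun p => p.1)).eraseIdx a.length
          = a.map (fun q => q.1) ++ b.map (fun q => q.1) := by
        rw [hfst, List.eraseIdx_eq_take_drop_succ]
        rw [List.take_append_of_le_length (by simp)]
        have hd : List.drop (a.length + 1)
            (List.map (fun q : Int × Int => q.1) a ++ p.1 :: List.map (fun q : Int × Int => q.1) b)
            = List.map (fun q : Int × Int => q.1) b := by
          rw [show (List.map (fun q : Int × Int => q.1) a ++ p.1 :: List.map (fun q : Int × Int => q.1) b)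
                = (List.map (fun q : Int × Int => q.1) a ++ [p.1]) ++ List.map (fun q : Int × Int => q.1) b by simp,
              show a.length + 1 = (List.map (fun q : Int × Int => q.1) a ++ [p.1]).length by simp]
          exact List.drop_left
        rw [hd]
        simp
      rw [mmxLoop]
      rw [if_pos hmem, hidx, hrem]
      simp only []
      have hmaps : a.map (fun q : Int × Int => q.1) ++ b.map (fun q : Int × Int => q.1)
          = (a ++ b).map (fun p => p.1) := by simp
      have hmaps2 : a.map (fun q : Int × Int => q.2) ++ b.map (fun q : Int × Int => q.2)
          = (a ++ b).map (fun p => p.2) := by simp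
      rw [hget, herase, hmaps, hmaps2]
      rw [ih (a ++ b) (acc ++ [p.1]) (by simp at h ⊢; omega)]
      have hfa1 : a.filter (fun p => p.2 == t) = [] := by
        rw [List.filter_eq_nil_iff]; intro q hq; simpa using ha q hq
      have hfa2 : a.filter (fun p => p.2 != t) = a :=
        List.filter_eq_self.mpr (fun q hq => by simpa using ha q hq)
      have hb1 : b.filter (fun p => p.2 == t) = b.filter (fun p => p.2 == t) := rfl
      simp [List.filter_append, hp, hfa1, hfa2]
    · have hall : ∀ q ∈ ps, q.2 ≠ t := by
        intro q hq hqt; exact hmem (List.mem_map.mpr ⟨q, hq, hqt⟩)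
      rw [mmxLoop, if_neg hmem]
      have h1 : ps.filter (fun p => p.2 == t) = [] := by
        rw [List.filter_eq_nil_iff]; intro q hq; simpa using hall q hq
      have h2 : ps.filter (fun p => p.2 != t) = ps :=
        List.filter_eq_self.mpr (fun q hq => by simpa using hall q hq)
      simp [h1, h2]

lemma comp_snd (g : List (Int × Int)) :
    (PySem.List.pyRange 0 (PySem.List.len g)).map (fun j => (PySem.List.pyGetD g j ((0 : Int), (0 : Int))).2)
      = g.map (fun p => p.2) := by
  rw [show (fun j => (PySem.List.pyGetD g j ((0 : Int), (0 : Int))).2)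
        = (fun p : Int × Int => p.2) ∘ (fun j => PySem.List.pyGetD g j ((0 : Int), (0 : Int))) from rfl,
      ← List.map_map, PySem.List.map_pyGetD_pyRange_zero]

lemma comp_fst (g : List (Int × Int)) :
    (PySem.List.pyRange 0 (PySem.List.len g)).map (fun j => (PySem.List.pyGetD g j ((0 : Int), (0 : Int))).1)
      = g.map (fun p => p.1) := by
  rw [show (fun j => (PySem.List.pyGetD g j ((0 : Int), (0 : Int))).1)
        = (fun p : Int × Int => p.1) ∘ (fun j => PySem.List.pyGetD g j ((0 : Int), (0 : Int))) from rfl,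
      ← List.map_map, PySem.List.map_pyGetD_pyRange_zero]

lemma body_eq (g : List (Int × Int)) (h4 : 4 ≤ g.length)
    (hne : ∃ p ∈ g, ∃ q ∈ g, p.2 ≠ q.2) (acc : List (List (Int × Int))) :
    aStep acc g = bStep acc g := by
  have hgne : (g.map (fun p => p.2)) ≠ [] := by
    intro h; rw [List.map_eq_nil_iff] at h; subst h; simp at h4
  obtain ⟨m, hm⟩ : ∃ m, PySem.List.min? (g.map (fun p => p.2)) (fun y => y) = some m := by
    cases hmin : PySem.List.min? (g.map (fun p => p.2)) (fun y => y) with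
    | none => exact absurd ((PySem.List.min?_eq_none_iff _ _).mp hmin) hgne
    | some m => exact ⟨m, rfl⟩
  obtain ⟨M, hM⟩ : ∃ M, PySem.List.max? (g.map (fun p => p.2)) (fun y => y) = some M := by
    cases hmax : PySem.List.max? (g.map (fun p => p.2)) (fun y => y) with
    | none => exact absurd ((PySem.List.max?_eq_none_iff _ _).mp hmax) hgne
    | some M => exact ⟨M, rfl⟩
  obtain ⟨p0, hp0, q0, hq0, hpq⟩ := hne
  obtain ⟨y', hy'm, hy'ne⟩ : ∃ y' ∈ g.map (fun p => p.2), y' ≠ m := by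
    by_cases h : p0.2 = m
    · exact ⟨q0.2, List.mem_map.mpr ⟨q0, hq0, rfl⟩, fun hq => hpq (h.trans hq.symm)⟩
    · exact ⟨p0.2, List.mem_map.mpr ⟨p0, hp0, rfl⟩, h⟩
  have hmy' : m < y' := lt_of_le_of_ne (PySem.List.min?_isMin hm y' hy'm) (Ne.symm hy'ne)
  have hMm : m < M := lt_of_lt_of_le hmy' (PySem.List.max?_isMax hM y' hy'm)
  have hsub : (g.filter (fun p => p.2 != m)).map (fun p => p.2)
      = (g.map (fun p => p.2)).filter (fun y => y != m) := by
    rw [List.filter_map]; rfl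
  have hMin1 : M ∈ (g.filter (fun p => p.2 != m)).map (fun p => p.2) := by
    rw [hsub]
    exact List.mem_filter.mpr ⟨PySem.List.max?_mem hM, by simp; omega⟩
  obtain ⟨M1, hM1⟩ : ∃ M1, PySem.List.max? ((g.filter (fun p => p.2 != m)).map (fun p => p.2)) (fun y => y) = some M1 := by
    cases hmax : PySem.List.max? ((g.filter (fun p => p.2 != m)).map (fun p => p.2)) (fun y => y) with
    | none => exact absurd ((List.ne_nil_of_mem hMin1)) (by simp [(PySem.List.max?_eq_none_iff _ _).mp hmax])
    | some M1 => exact ⟨M1, rfl⟩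
  have hM1M : M1 = M := by
    refine le_antisymm ?_ (PySem.List.max?_isMax hM1 M hMin1)
    refine PySem.List.max?_isMax hM M1 ?_
    have := PySem.List.max?_mem hM1
    rw [hsub] at this
    exact List.mem_of_mem_filter this
  have hfil : (g.filter (fun p => p.2 != m)).filter (fun p => p.2 == M)
      = g.filter (fun p => p.2 == M) := by
    rw [List.filter_filter]
    apply List.filter_congr
    intro x hx
    by_cases hxM : x.2 = M
    · simp [hxM]; omega
    · simp [hxM]
  simp only [aStep, bStep]
  rw [comp_snd, comp_fst, hm]
  simp only [Option.getD_some]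
  rw [mmx_spec m ((g.map (fun p => p.2)).length) g [] (by simp)]
  simp only [List.nil_append]
  rw [hM1]
  simp only [Option.getD_some, hM1M]
  rw [mmx_spec M ((g.filter (fun p => p.2 != m)).map (fun p => p.2)).length
      (g.filter (fun p => p.2 != m)) [] (by simp)]
  simp only [List.nil_append]
  rw [hfil, hM]
  simp only [Option.getD_some]

-- ===== VERDICT (by name: the statement is the Claim_ definition above) =====
theorem transform_to_room_spec : Claim_equal_transform_to_room := by
  intro l _ hpre
  unfold Spec_transform_to_room transform_to_room transform_to_room_alt
  rw [prune_spec l.length l 0 (by omega)]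
  simp only [List.take_zero, List.drop_zero, List.nil_append]
  rw [PySem.List.foldl_pyRange_pyGetD _ _ _ _ (le_refl 0)]
  simp only [Int.toNat_zero, List.drop_zero]
  apply PySem.List.foldl_congr_mem
  intro acc g hg
  have hmem := List.mem_filter.mp hg
  exact body_eq g (by simpa using hmem.2) (hpre g hmem.1 (by simpa using hmem.2)) acc
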